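-- pv_equiv track=rewrite | github.com/howardjong/worksheet-builder | corpus/ufli/ingest.py | _derive_grade
-- ===== SOURCE A (Python) =====
-- _GRADE_RANGES: list[tuple[str, str, str]] = [
--     # (start, end, grade)  — for numeric lessons
--     ("1", "34", "K"),
--     ("35", "64", "1"),
--     ("65", "94", "1"),
--     ("95", "128", "2"),
-- ]
--
-- _ALPHA_LESSONS = set("ABCDEFGHIJ")
--
-- def _derive_grade(lesson_id: str) -> str:
--     """Derive grade level from UFLI lesson ID."""
--     if lesson_id.upper() in _ALPHA_LESSONS:
--         return "K"
--     try:
--         num = int(lesson_id)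
--     except ValueError:
--         return "K"
--     for start, end, grade in _GRADE_RANGES:
--         if int(start) <= num <= int(end):
--             return grade
--     return "2"
-- ===== SOURCE B (Python) =====
-- def _derive_grade(lesson_id: str) -> str:
--     """Derive grade level from UFLI lesson ID."""
--     try:
--         num = int(lesson_id)
--     except ValueError:
--         return "K"  # non-numeric IDs (including alpha lessons A-J) are Kindergarten
--     if 1 <= num <= 34:
--         return "K"
--     if 35 <= num <= 94:
--         return "1"
--     return "2"
-- ===== Notes on version B (the rewrite author's own statement) =====
-- stated objective: simpler
-- what changed: Drops the _ALPHA_LESSONS set and its upper() membership test (redundant, since any such ID fails int() and falls into the same 'K' branch) and replaces the _GRADE_RANGES table with its per-row int() parsing and scanning loop by a direct comparison chain on num.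
import Mathlib
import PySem

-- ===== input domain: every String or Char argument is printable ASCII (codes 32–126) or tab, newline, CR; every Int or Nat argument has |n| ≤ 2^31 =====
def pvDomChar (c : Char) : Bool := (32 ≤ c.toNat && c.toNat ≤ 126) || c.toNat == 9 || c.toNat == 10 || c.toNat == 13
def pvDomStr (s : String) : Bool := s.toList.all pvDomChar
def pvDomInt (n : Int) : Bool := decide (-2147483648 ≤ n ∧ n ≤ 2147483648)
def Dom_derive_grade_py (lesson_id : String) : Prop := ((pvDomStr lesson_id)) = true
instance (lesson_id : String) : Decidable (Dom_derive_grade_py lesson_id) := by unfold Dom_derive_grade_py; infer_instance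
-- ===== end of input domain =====

-- B drops the redundant _ALPHA_LESSONS membership test and replaces the _GRADE_RANGES table scan
-- with a direct comparison chain; return values agree with A on every input (objective: simpler).

-- ===== PORT A =====
def gradeRangesPy : List (String × String × String) :=
  [("1", "34", "K"), ("35", "64", "1"), ("65", "94", "1"), ("95", "128", "2")]

def alphaLessonsPy : PySem.Set String :=
  PySem.Set.ofList ["A", "B", "C", "D", "E", "F", "G", "H", "I", "J"]

-- the loop 'for start, end, grade in _GRADE_RANGES: …'; int(start)/int(end) on the table's
-- literals always parse, so '.getD 0' is exact here (the default is never taken)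
def gradeLoopPy (num : Int) : List (String × String × String) → String
  | [] => "2"
  | (st, en, gr) :: rest =>
      if (PySem.Int.ofStr? st).getD 0 ≤ num ∧ num ≤ (PySem.Int.ofStr? en).getD 0 then gr
      else gradeLoopPy num rest

def derive_grade_py (lesson_id : String) : String :=
  if PySem.Set.contains alphaLessonsPy (PySem.Str.upper lesson_id) then "K"
  else
    match PySem.Int.ofStr? lesson_id with
    | none => "K"
    | some num => gradeLoopPy num gradeRangesPy

-- ===== PORT B =====
def derive_grade_py_alt (lesson_id : String) : String :=
  match PySem.Int.ofStr? lesson_id with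
  | none => "K"
  | some num =>
      if 1 ≤ num ∧ num ≤ 34 then "K"
      else if 35 ≤ num ∧ num ≤ 94 then "1"
      else "2"

-- ===== PRECONDITION & SPEC =====
def Spec_derive_grade_py (lesson_id : String) (out : String) : Prop := out = derive_grade_py_alt lesson_id
instance (lesson_id : String) (out : String) : Decidable (Spec_derive_grade_py lesson_id out) := by unfold Spec_derive_grade_py; infer_instance

-- ===== CLAIM (what is proved, stated in full; the proofs are below) =====
def Claim_equal_derive_grade_py : Prop := ∀ (lesson_id : String), Dom_derive_grade_py lesson_id → Spec_derive_grade_py lesson_id (derive_grade_py lesson_id)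

-- ===== LEMMAS AND PROOFS =====

-- upperChar c = u for an uppercase letter u forces c = u or c = the corresponding lowercase letter
theorem upperChar_cases (c u : Char) (h : PySem.Chars.upperChar c = u) :
    c = u ∨ c = Char.ofNat (u.toNat + 32) := by
  unfold PySem.Chars.upperChar PySem.Chars.islower at h
  by_cases hl : ('a' ≤ c ∧ c ≤ 'z')
  · right
    have hn : 97 ≤ c.toNat ∧ c.toNat ≤ 122 := ⟨hl.1, hl.2⟩
    have hv : (c.toNat - 32).isValidChar := by constructor; omega
    have h2 : (Char.ofNat (c.toNat - 32)).toNat = u.toNat := by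
      rw [if_pos (by simp [hl.1, hl.2])] at h; rw [h]
    rw [Char.toNat_ofNat, if_pos hv] at h2
    have hc : c.toNat = u.toNat + 32 := by omega
    calc c = Char.ofNat c.toNat := (Char.ofNat_toNat c).symm
    _ = Char.ofNat (u.toNat + 32) := by rw [hc]
  · left
    rw [if_neg (by simp only [Bool.and_eq_true, decide_eq_true_eq]; exact fun ⟨x, y⟩ => hl ⟨x, y⟩)] at h
    exact h

theorem upper_eq_singleton (l : List Char) (u : Char) (h : PySem.Chars.upper l = [u]) :
    ∃ c, l = [c] ∧ PySem.Chars.upperChar c = u := by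
  unfold PySem.Chars.upper at h
  cases l with
  | nil => simp at h
  | cons c t =>
    simp only [List.map_cons, List.cons.injEq, List.map_eq_nil_iff] at h
    exact ⟨c, by rw [h.2], h.1⟩

-- if upper(s) is one of the alpha lessons "A".."J", then int(s) raises ValueError
theorem alpha_ofStr_none (s : String)
    (h : PySem.Str.upper s ∈ (["A", "B", "C", "D", "E", "F", "G", "H", "I", "J"] : List String)) :
    PySem.Int.ofStr? s = none := by
  have h1 : PySem.Chars.upper s.toList = (PySem.Str.upper s).toList := by
    simp [PySem.Str.upper]
  simp only [List.mem_cons, List.not_mem_nil, or_false] at h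
  rcases h with h|h|h|h|h|h|h|h|h|h <;>
  · rw [h] at h1
    obtain ⟨c, hs, hc⟩ := upper_eq_singleton s.toList _ h1
    rcases upperChar_cases c _ hc with rfl | rfl <;>
    · show PySem.Int.ofChars? s.toList = none
      rw [hs]
      decide

theorem contains_alpha_mem (u : String)
    (h : PySem.Set.contains alphaLessonsPy u = true) :
    u ∈ (["A", "B", "C", "D", "E", "F", "G", "H", "I", "J"] : List String) := by
  have : u ∈ alphaLessonsPy := by
    simpa [PySem.Set.contains] using h
  simpa [alphaLessonsPy, PySem.Set.mem_ofList] using this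

-- ===== VERDICT (by name: the statement is the Claim_ definition above) =====
theorem derive_grade_py_spec : Claim_equal_derive_grade_py := by
  intro lesson_id _
  unfold Spec_derive_grade_py derive_grade_py derive_grade_py_alt
  by_cases hct : PySem.Set.contains alphaLessonsPy (PySem.Str.upper lesson_id) = true
  · rw [if_pos hct, alpha_ofStr_none lesson_id (contains_alpha_mem _ hct)]
  · rw [if_neg hct]
    cases hnum : PySem.Int.ofStr? lesson_id with
    | none => rfl
    | some num =>
      show gradeLoopPy num gradeRangesPy = _
      simp only [gradeRangesPy, gradeLoopPy,
        show (PySem.Int.ofStr? "1").getD 0 = 1 from by decide,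
        show (PySem.Int.ofStr? "34").getD 0 = 34 from by decide,
        show (PySem.Int.ofStr? "35").getD 0 = 35 from by decide,
        show (PySem.Int.ofStr? "64").getD 0 = 64 from by decide,
        show (PySem.Int.ofStr? "65").getD 0 = 65 from by decide,
        show (PySem.Int.ofStr? "94").getD 0 = 94 from by decide,
        show (PySem.Int.ofStr? "95").getD 0 = 95 from by decide,
        show (PySem.Int.ofStr? "128").getD 0 = 128 from by decide]
      split_ifs <;> first | rfl | omega
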